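-- pv_equiv track=rewrite | github.com/JungVictor/NeuralNetworks | refiner.py | description_hash
-- ===== SOURCE A (Python) =====
-- def keys_value(keys):
--     """
--         Associate to each key a power-2 value
--
--         :Exemple:
--         >>> keys_value(["fruit", "ripe", "smooth", "rustic", "herb"])
--         ({'fruit': 1, 'ripe': 2, 'smooth': 4, 'rustic': 8, 'herb': 16}, {1: 'fruit', 2: 'ripe', 4: 'smooth', 8: 'rustic', 16: 'herb'})
--     """
--     value = 1
--     values = {}
--     reverse_values = {}
--     for key in keys:
--         values[key] = value
--         reverse_values[value] = key
--         value += value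
--     return values, reverse_values
--
-- def description_hash(array, keys):
--     """
--         Associate to each element of the array an integer value based on the keys.
--         Return the hashed array and the values for each key.
--
--         :Exemple:
--         >>> description_hash(["This is fruity and smooth", "This is rustic and ripe"], ["fruit", "ripe", "smooth", "rustic", "herb"])
--         ([5, 10], {'fruit': 1, 'ripe': 2, 'smooth': 4, 'rustic': 8, 'herb': 16}, {1: 'fruit', 2: 'ripe', 4: 'smooth', 8: 'rustic', 16: 'herb'})
--
--         >>> description_hash(["This is fruity and smooth, with a rustic taste", "This is rustic and contains herbs"], ["fruit", "ripe", "smooth", "rustic", "herb"])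
--         ([13, 24], {'fruit': 1, 'ripe': 2, 'smooth': 4, 'rustic': 8, 'herb': 16}, {1: 'fruit', 2: 'ripe', 4: 'smooth', 8: 'rustic', 16: 'herb'})
--     """
--     values, reverse_values = keys_value(keys)
--     column = []
--     for element in array:
--         value = 0
--         for key in keys:
--             if key in element:
--                 value += values[key]
--         column.append(value)
--     return column, values, reverse_values
-- ===== SOURCE B (Python) =====
-- def description_hash(array, keys):
--     # Different decomposition: powers assigned by bit-shift on the key's index,
--     # and the main work done key-major (one sweep of the array per key,
--     # rebuilding the accumulator column with zip) instead of element-major.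
--     values = {}
--     reverse_values = {}
--     for i, key in enumerate(keys):
--         v = 1 << i
--         values[key] = v
--         reverse_values[v] = key
--     column = [0] * len(array)
--     for key in keys:
--         v = values[key]
--         column = [c + v if key in element else c for c, element in zip(column, array)]
--     return column, values, reverse_values
-- ===== Notes on version B (the rewrite author's own statement) =====
-- stated objective: alternative
-- what changed: B assigns each key's power-of-two by bit-shifting its enumerate index instead of a running doubled accumulator, and computes the hash column key-major (one sweep of the array per key, rebuilding the column of partial sums with zip) instead of element-major with a per-element inner key loop.
import Mathlib
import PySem

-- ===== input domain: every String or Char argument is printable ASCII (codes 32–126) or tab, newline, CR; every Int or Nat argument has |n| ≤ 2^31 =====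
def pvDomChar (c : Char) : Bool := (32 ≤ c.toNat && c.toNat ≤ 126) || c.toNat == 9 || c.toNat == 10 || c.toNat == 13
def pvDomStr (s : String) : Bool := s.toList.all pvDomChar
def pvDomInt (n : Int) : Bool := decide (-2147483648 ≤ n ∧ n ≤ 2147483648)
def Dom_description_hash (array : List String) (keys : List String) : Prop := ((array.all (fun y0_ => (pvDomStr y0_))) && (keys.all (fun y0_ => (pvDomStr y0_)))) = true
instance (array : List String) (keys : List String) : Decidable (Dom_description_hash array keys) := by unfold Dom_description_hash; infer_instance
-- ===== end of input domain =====

-- B restructures A: key powers come from bit-shifting the enumerate index, and the hash column is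
-- built key-major (one array sweep per key, rebuilding the partial-sum column) instead of element-major.

-- ===== PORT A =====
-- helper keys_value: running value doubled each iteration, two dicts built in one pass
def keysValue (keys : List String) : PySem.Dict String Int × PySem.Dict Int String :=
  let s := keys.foldl
    (fun (s : Int × PySem.Dict String Int × PySem.Dict Int String) key =>
      (s.1 + s.1, s.2.1.insert key s.1, s.2.2.insert s.1 key))
    (1, PySem.Dict.empty, PySem.Dict.empty)
  (s.2.1, s.2.2)

def description_hash (array : List String) (keys : List String) : List Int × (List (String × Int)) × (List (Int × String)) :=
  let vd := keysValue keys
  let column := array.foldl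
    (fun col element =>
      col ++ [keys.foldl
        (fun value key => if PySem.Str.isIn key element then value + vd.1.getD key 0 else value) 0])
    []
  (column, vd.1.items, vd.2.items)

-- ===== PORT B =====
def description_hash_alt (array : List String) (keys : List String) : List Int × (List (String × Int)) × (List (Int × String)) :=
  let vd := (PySem.List.enumerate keys).foldl
    (fun (s : PySem.Dict String Int × PySem.Dict Int String) p =>
      let v : Int := Int.shiftLeft 1 p.1.toNat
      (s.1.insert p.2 v, s.2.insert v p.2))
    (PySem.Dict.empty, PySem.Dict.empty)
  let column0 := array.map (fun _ => (0 : Int))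
  let column := keys.foldl
    (fun col key =>
      let v := vd.1.getD key 0
      List.zipWith (fun c element => if PySem.Str.isIn key element then c + v else c) col array)
    column0
  (column, vd.1.items, vd.2.items)

-- ===== PRECONDITION & SPEC =====
def Spec_description_hash (array : List String) (keys : List String) (out : List Int × (List (String × Int)) × (List (Int × String))) : Prop := out = description_hash_alt array keys
instance (array : List String) (keys : List String) (out : List Int × (List (String × Int)) × (List (Int × String))) : Decidable (Spec_description_hash array keys out) := by unfold Spec_description_hash; infer_instance

-- ===== CLAIM (what is proved, stated in full; the proofs are below) =====
def Claim_equal_description_hash : Prop := ∀ (array : List String) (keys : List String), Dom_description_hash array keys → Spec_description_hash array keys (description_hash array keys)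

-- ===== LEMMAS AND PROOFS =====

lemma zipWith_map_self {α β : Type} (f : β → α → β) (h : α → β) (l : List α) :
    List.zipWith f (l.map h) l = l.map (fun x => f (h x) x) := by
  induction l with
  | nil => rfl
  | cons a as ih => simp [ih]

-- the two dict-building loops produce the same pair of dicts
lemma dicts_eq_aux (keys : List String) (i : Nat)
    (d1 : PySem.Dict String Int) (d2 : PySem.Dict Int String) :
    (keys.foldl
      (fun (s : Int × PySem.Dict String Int × PySem.Dict Int String) key =>
        (s.1 + s.1, s.2.1.insert key s.1, s.2.2.insert s.1 key))
      ((2 : Int) ^ i, d1, d2)).2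
    = (PySem.List.enumerate keys (i : Int)).foldl
        (fun (s : PySem.Dict String Int × PySem.Dict Int String) p =>
          (s.1.insert p.2 (Int.shiftLeft 1 p.1.toNat), s.2.insert (Int.shiftLeft 1 p.1.toNat) p.2))
        (d1, d2) := by
  induction keys generalizing i d1 d2 with
  | nil => simp [PySem.List.enumerate_nil]
  | cons k ks ih =>
    rw [PySem.List.enumerate_cons]
    simp only [List.foldl_cons]
    have hsh : Int.shiftLeft 1 (((i : Int)).toNat) = (2 : Int) ^ i := by
      show (1 : Int) <<< ((i : Int)).toNat = 2 ^ i
      rw [Int.shiftLeft_eq]; simp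
    have hdd : (2 : Int) ^ i + (2 : Int) ^ i = (2 : Int) ^ (i + 1) := by ring
    rw [hsh, hdd]
    have : ((i : Int) + 1) = ((i + 1 : Nat) : Int) := by push_cast; ring
    rw [this]
    exact ih (i + 1) _ _

lemma dicts_eq (keys : List String) :
    ((keysValue keys).1, (keysValue keys).2)
    = (PySem.List.enumerate keys).foldl
        (fun (s : PySem.Dict String Int × PySem.Dict Int String) p =>
          (s.1.insert p.2 (Int.shiftLeft 1 p.1.toNat), s.2.insert (Int.shiftLeft 1 p.1.toNat) p.2))
        (PySem.Dict.empty, PySem.Dict.empty) := by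
  have h := dicts_eq_aux keys 0 PySem.Dict.empty PySem.Dict.empty
  simpa [keysValue] using h

-- B's key-major column fold, started from a pointwise column, is the element-major map
lemma colB_eq (keys array : List String) (w : String → Int) (h : String → Int) :
    keys.foldl
      (fun col key =>
        List.zipWith (fun c element => if PySem.Str.isIn key element then c + w key else c) col array)
      (array.map h)
    = array.map (fun el =>
        keys.foldl (fun value key => if PySem.Str.isIn key el then value + w key else value) (h el)) := by
  induction keys generalizing h with
  | nil => simp
  | cons k ks ih =>
    simp only [List.foldl_cons]
    rw [zipWith_map_self (fun c element => if PySem.Str.isIn k element then c + w k else c) h array]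
    exact ih (fun el => if PySem.Str.isIn k el then h el + w k else h el)

-- ===== VERDICT (by name: the statement is the Claim_ definition above) =====
theorem description_hash_spec : Claim_equal_description_hash := by
  intro array keys _
  unfold Spec_description_hash description_hash description_hash_alt
  have hd := dicts_eq keys
  have h1 : (keysValue keys).1 = ((PySem.List.enumerate keys).foldl
      (fun (s : PySem.Dict String Int × PySem.Dict Int String) p =>
        (s.1.insert p.2 (Int.shiftLeft 1 p.1.toNat), s.2.insert (Int.shiftLeft 1 p.1.toNat) p.2))
      (PySem.Dict.empty, PySem.Dict.empty)).1 := by rw [← hd]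
  have h2 : (keysValue keys).2 = ((PySem.List.enumerate keys).foldl
      (fun (s : PySem.Dict String Int × PySem.Dict Int String) p =>
        (s.1.insert p.2 (Int.shiftLeft 1 p.1.toNat), s.2.insert (Int.shiftLeft 1 p.1.toNat) p.2))
      (PySem.Dict.empty, PySem.Dict.empty)).2 := by rw [← hd]
  simp only [h1, h2]
  rw [PySem.List.foldl_append_singleton_eq_map,
      colB_eq keys array _ (fun _ => (0 : Int))]
  simp
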